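-- pv_equiv track=rewrite | github.com/savkov/bratutils | src/bratutils/redactor.py | redact_line
-- ===== SOURCE A (Python) =====
-- def redact_line(l):
--     its = l.split('\t')
--     toks = its[-1].split(' ')
--     redacted = []
--     for t in toks:
--         redacted.append('~' * len(t))
--     its[-1] = ' '.join(redacted)
--     return '\t'.join(its)
-- ===== SOURCE B (Python) =====
-- def redact_line(l):
--     its = l.split('\t')
--     its[-1] = ''.join('~' if c != ' ' else ' ' for c in its[-1])
--     return '\t'.join(its)
-- ===== Notes on version B (the rewrite author's own statement) =====
-- stated objective: simpler
-- what changed: The last tab-field is redacted by a single per-character pass (each non-space character becomes '~') instead of splitting it into space-separated tokens, building a list of tilde runs and rejoining with spaces.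
import Mathlib
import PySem

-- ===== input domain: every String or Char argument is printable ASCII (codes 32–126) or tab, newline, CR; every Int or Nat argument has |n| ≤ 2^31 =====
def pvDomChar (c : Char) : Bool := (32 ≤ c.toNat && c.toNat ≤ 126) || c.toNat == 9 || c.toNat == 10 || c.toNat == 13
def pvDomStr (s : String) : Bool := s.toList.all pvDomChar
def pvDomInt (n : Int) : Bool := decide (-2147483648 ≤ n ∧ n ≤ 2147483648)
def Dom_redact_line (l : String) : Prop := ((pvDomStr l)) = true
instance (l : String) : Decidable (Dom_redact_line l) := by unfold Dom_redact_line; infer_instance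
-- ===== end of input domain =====

-- B redacts the last tab-field with one per-character pass instead of A's token split / tilde-run list / space rejoin: simpler, same O(n) cost.

-- ===== PORT A =====
-- its = l.split('\t'); toks = its[-1].split(' '); loop appending '~'*len(t); its[-1] = ' '.join(...); return '\t'.join(its)
def redact_line (l : String) : String :=
  let its := PySem.Chars.splitOn l.toList ['\t']
  match PySem.List.pyGet? its (-1) with
  | none => ""   -- unreachable: split('\t') always returns a non-empty list, so its[-1] never raises
  | some last =>
    let toks := PySem.Chars.splitOn last [' ']
    let redacted := toks.foldl (fun acc t => acc ++ [List.replicate t.length '~']) ([] : List (List Char))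
    let its' := its.dropLast ++ [PySem.Chars.join [' '] redacted]   -- its[-1] = ' '.join(redacted)
    String.ofList (PySem.Chars.join ['\t'] its')

-- ===== PORT B =====
-- its = l.split('\t'); its[-1] = ''.join('~' if c != ' ' else ' ' for c in its[-1]); return '\t'.join(its)
def redact_line_alt (l : String) : String :=
  let its := PySem.Chars.splitOn l.toList ['\t']
  match PySem.List.pyGet? its (-1) with
  | none => ""   -- unreachable: split('\t') always returns a non-empty list, so its[-1] never raises
  | some last =>
    let its' := its.dropLast ++ [last.map (fun c => if c ≠ ' ' then '~' else ' ')]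
    String.ofList (PySem.Chars.join ['\t'] its')

-- ===== PRECONDITION & SPEC =====
def Spec_redact_line (l : String) (out : String) : Prop := out = redact_line_alt l
instance (l : String) (out : String) : Decidable (Spec_redact_line l out) := by unfold Spec_redact_line; infer_instance

-- ===== CLAIM (what is proved, stated in full; the proofs are below) =====
def Claim_equal_redact_line : Prop := ∀ (l : String), Dom_redact_line l → Spec_redact_line l (redact_line l)

-- ===== LEMMAS AND PROOFS =====

-- structural model of Python's split on a single-character separator
def pvSplit1 (s : Char) : List Char → List (List Char)
  | [] => [[]]
  | c :: cs =>
      if c = s then [] :: pvSplit1 s cs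
      else match pvSplit1 s cs with
        | [] => [[c]]
        | h :: t => (c :: h) :: t

theorem pvSplit1_nil (s : Char) : pvSplit1 s [] = [[]] := rfl

theorem pvSplit1_cons (s c : Char) (cs : List Char) :
    pvSplit1 s (c :: cs) =
      if c = s then [] :: pvSplit1 s cs
      else match pvSplit1 s cs with
        | [] => [[c]]
        | h :: t => (c :: h) :: t := rfl

theorem pvSplit1_ne_nil (s : Char) (l : List Char) : pvSplit1 s l ≠ [] := by
  cases l with
  | nil => simp [pvSplit1]
  | cons c cs =>
    rw [pvSplit1_cons]
    split <;> simp_all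
    split <;> simp_all

-- splitOn.go with enough fuel computes pvSplit1 (cur.reverse joins the head, acc.reverse is prepended)
theorem pvGo_eq (s : Char) : ∀ (fuel : Nat) (l cur : List Char) (acc : List (List Char)),
    l.length < fuel →
    PySem.Chars.splitOn.go [s] fuel l cur acc =
      acc.reverse ++ (match pvSplit1 s l with
        | [] => [cur.reverse]
        | h :: t => (cur.reverse ++ h) :: t) := by
  intro fuel
  induction fuel with
  | zero => intro l cur acc h; omega
  | succ n ih =>
    intro l cur acc h
    cases l with
    | nil => simp [PySem.Chars.splitOn.go, pvSplit1]
    | cons c rest =>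
      simp only [PySem.Chars.splitOn.go]
      by_cases hc : c = s
      · subst hc
        have hpre : List.isPrefixOf [c] (c :: rest) = true := by
          simp [List.isPrefixOf]
        rw [if_pos hpre]
        simp only [List.length_cons, List.length_nil, Nat.zero_add, List.drop_succ_cons,
          List.drop_zero]
        rw [ih rest [] (cur.reverse :: acc) (by simpa using Nat.lt_of_succ_lt_succ h)]
        rw [pvSplit1_cons, if_pos rfl]
        cases hsp : pvSplit1 c rest with
        | nil => exact absurd hsp (pvSplit1_ne_nil c rest)
        | cons hh tt => simp
      · have hpre : List.isPrefixOf [s] (c :: rest) = false := by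
          simp only [List.isPrefixOf, Bool.and_true]
          exact beq_eq_false_iff_ne.mpr (fun hsc => hc hsc.symm)
        simp only [hpre, Bool.false_eq_true, if_false]
        rw [ih rest (c :: cur) acc (by simpa using Nat.lt_of_succ_lt_succ h)]
        rw [pvSplit1_cons, if_neg hc]
        cases hsp : pvSplit1 s rest with
        | nil => exact absurd hsp (pvSplit1_ne_nil s rest)
        | cons hh tt => simp

theorem splitOn_eq_pvSplit1 (s : Char) (l : List Char) :
    PySem.Chars.splitOn l [s] = pvSplit1 s l := by
  unfold PySem.Chars.splitOn
  rw [pvGo_eq s (l.length + 1) l [] [] (Nat.lt_succ_self _)]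
  cases hsp : pvSplit1 s l with
  | nil => exact absurd hsp (pvSplit1_ne_nil s l)
  | cons h t => simp

-- A's append loop builds the list of '~'-runs, i.e. a map
theorem foldl_append_map (f : List Char → List Char) :
    ∀ (toks : List (List Char)) (acc : List (List Char)),
    toks.foldl (fun acc t => acc ++ [f t]) acc = acc ++ toks.map f := by
  intro toks
  induction toks with
  | nil => simp
  | cons t ts ih => intro acc; simp [List.foldl_cons, ih]

-- the heart: ' '.join('~'*len(tok) for tok in t.split(' ')) is the per-character redaction
theorem join_redact_eq_map (l : List Char) :
    PySem.Chars.join [' '] ((pvSplit1 ' ' l).map (fun t => List.replicate t.length '~')) =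
      l.map (fun c => if c ≠ ' ' then '~' else ' ') := by
  induction l with
  | nil => simp [pvSplit1_nil, PySem.Chars.join_singleton]
  | cons c cs ih =>
    rw [pvSplit1_cons]
    cases hsp : pvSplit1 ' ' cs with
    | nil => exact absurd hsp (pvSplit1_ne_nil ' ' cs)
    | cons h t =>
      rw [hsp] at ih
      by_cases hc : c = ' '
      · subst hc
        rw [if_pos rfl]
        simp only [List.map_cons] at ih ⊢
        rw [PySem.Chars.join_cons_cons]
        simp [ih]
      · rw [if_neg hc]
        simp only [List.map_cons, List.length_cons, List.replicate_succ] at ih ⊢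
        cases t with
        | nil =>
          simp only [List.map_nil, PySem.Chars.join_singleton] at ih ⊢
          simp [ih, hc]
        | cons q qs =>
          simp only [List.map_cons] at ih ⊢
          rw [PySem.Chars.join_cons_cons] at ih ⊢
          simp [ih, hc]

-- ===== VERDICT (by name: the statement is the Claim_ definition above) =====
theorem redact_line_spec : Claim_equal_redact_line := by
  intro l _
  unfold Spec_redact_line
  simp only [redact_line, redact_line_alt]
  cases hget : PySem.List.pyGet? (PySem.Chars.splitOn l.toList ['\t']) (-1) with
  | none => rfl
  | some last =>
    simp only [foldl_append_map, List.nil_append, splitOn_eq_pvSplit1, join_redact_eq_map]
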